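-- pv_equiv track=rewrite | github.com/chenscheimq/QEC | ECC/Hamming.py | fix_error
-- ===== SOURCE A (Python) =====
-- def fix_error(arr, location):
--     res = ''
--     arr = arr[::-1]
--     for i in range(len(arr)):
--         if i == (location-1):
--             corrected = int(arr[i]) ^ 1
--             res += str(corrected)
--         else:
--             res += str(arr[i])
--     return res[::-1]
-- ===== SOURCE B (Python) =====
-- def fix_error(arr, location):
--     idx = len(arr) - location
--     if 0 <= idx < len(arr):
--         return arr[:idx] + str(int(arr[idx]) ^ 1) + arr[idx + 1:]
--     return arr
-- ===== Notes on version B (the rewrite author's own statement) =====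
-- stated objective: simpler
-- what changed: B computes the flip index directly as len(arr)-location and splices the flipped digit with slices, replacing A's double string reversal and per-position conditional scan.
import Mathlib
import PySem

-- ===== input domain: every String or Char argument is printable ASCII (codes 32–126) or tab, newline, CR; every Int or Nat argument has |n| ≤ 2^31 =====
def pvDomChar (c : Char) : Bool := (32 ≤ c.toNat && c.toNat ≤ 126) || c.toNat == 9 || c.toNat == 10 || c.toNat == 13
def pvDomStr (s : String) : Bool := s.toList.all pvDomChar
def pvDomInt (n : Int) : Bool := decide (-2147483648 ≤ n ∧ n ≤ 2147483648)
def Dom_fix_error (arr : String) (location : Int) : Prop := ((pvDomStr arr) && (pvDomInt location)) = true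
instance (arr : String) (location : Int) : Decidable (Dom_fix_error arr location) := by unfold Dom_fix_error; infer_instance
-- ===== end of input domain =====

-- B locates the bit to flip arithmetically (idx = len - location) and splices once,
-- instead of A's double reversal with a per-position conditional scan: simpler, one pass fewer.


-- shared helper: both Pythons contain the very same subexpression  str(int(ch) ^ 1)
def pvFlipDigit (c : Char) : List Char :=
  PySem.Int.toChars (PySem.Int.bxor ((PySem.Int.ofChars? [c]).getD 0) 1)

-- ===== PORT A =====
def fix_error (arr : String) (location : Int) : String :=
  let rev := arr.toList.reverse                      -- arr = arr[::-1]
  let res := (PySem.List.pyRange 0 (rev.length : Int) 1).foldl   -- for i in range(len(arr))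
      (fun acc i =>
        if i = location - 1 then acc ++ pvFlipDigit (PySem.List.pyGetD rev i ' ')
        else acc ++ [PySem.List.pyGetD rev i ' ']) []
  String.ofList res.reverse                          -- return res[::-1]

-- ===== PORT B =====
def fix_error_alt (arr : String) (location : Int) : String :=
  let cs := arr.toList
  let idx : Int := (cs.length : Int) - location
  if 0 ≤ idx ∧ idx < (cs.length : Int) then
    String.ofList (PySem.List.slice cs none (some idx) ++
      pvFlipDigit (PySem.List.pyGetD cs idx ' ') ++
      PySem.List.slice cs (some (idx + 1)) none)
  else String.ofList cs

-- ===== PRECONDITION & SPEC =====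
-- Pre_ excludes exactly the inputs on which A raises ValueError: when the flip position is
-- inside the string (1 ≤ location ≤ len), the character there must be a decimal digit for int().
def Pre_fix_error (arr : String) (location : Int) : Prop :=
  1 ≤ location → location ≤ (arr.toList.length : Int) →
    (arr.toList.getD (arr.toList.length - location.toNat) '0').isDigit = true
instance (arr : String) (location : Int) : Decidable (Pre_fix_error arr location) := by
  unfold Pre_fix_error; infer_instance

def pvWitness_fix_error : String × Int := ("0110", 2)

def Spec_fix_error (arr : String) (location : Int) (out : String) : Prop := out = fix_error_alt arr location
instance (arr : String) (location : Int) (out : String) : Decidable (Spec_fix_error arr location out) := by unfold Spec_fix_error; infer_instance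

-- ===== CLAIM (what is proved, stated in full; the proofs are below) =====
def Claim_equal_fix_error : Prop := ∀ (arr : String) (location : Int), Dom_fix_error arr location → Pre_fix_error arr location → Spec_fix_error arr location (fix_error arr location)

-- ===== LEMMAS AND PROOFS =====

lemma pv_flatMap_eq_map_of {α β : Type} (l : List α) (g : α → List β) (f : α → β)
    (h : ∀ x ∈ l, g x = [f x]) : l.flatMap g = l.map f := by
  induction l with
  | nil => rfl
  | cons a t ih =>
      simp only [List.flatMap_cons, List.map_cons, h a (by simp)]
      simp [ih fun x hx => h x (by simp [hx])]

lemma pv_digit_mem (c : Char) (h : c.isDigit = true) :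
    c ∈ ['0','1','2','3','4','5','6','7','8','9'] := by
  have hb : 48 ≤ c.toNat ∧ c.toNat ≤ 57 := by
    simp [Char.isDigit] at h; exact ⟨h.1, h.2⟩
  have hofnat : Char.ofNat c.toNat = c := Char.ofNat_toNat c
  have h10 : c.toNat = 48 ∨ c.toNat = 49 ∨ c.toNat = 50 ∨ c.toNat = 51 ∨ c.toNat = 52 ∨
      c.toNat = 53 ∨ c.toNat = 54 ∨ c.toNat = 55 ∨ c.toNat = 56 ∨ c.toNat = 57 := by omega
  rcases h10 with h'|h'|h'|h'|h'|h'|h'|h'|h'|h' <;> rw [h'] at hofnat <;> rw [← hofnat] <;> decide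

lemma pv_flip_rev (c : Char) (h : c.isDigit = true) :
    (pvFlipDigit c).reverse = pvFlipDigit c := by
  have := pv_digit_mem c h
  fin_cases this <;> decide

lemma pv_map_pyGetD_take (xs : List Char) (k : Nat) (hk : k ≤ xs.length) :
    (PySem.List.pyRange 0 (k:Int) 1).map (fun j => PySem.List.pyGetD xs j ' ') = xs.take k := by
  apply List.ext_getElem
  · simp [PySem.List.length_pyRange_one, hk]
  · intro i h1 h2
    have hi : i < k := by simpa [PySem.List.length_pyRange_one] using h1
    have hilen : i < xs.length := lt_of_lt_of_le hi hk
    simp only [List.getElem_map, PySem.List.getElem_pyRange_one, zero_add, List.getElem_take]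
    rw [PySem.List.pyGetD_natCast]
    exact List.getD_eq_getElem xs ' ' hilen

theorem fix_error_eq (arr : String) (location : Int)
    (hpre : Pre_fix_error arr location) :
    fix_error arr location = fix_error_alt arr location := by
  simp only [fix_error, fix_error_alt]
  set cs := arr.toList with hcs
  set n := cs.length with hn
  by_cases hin : 1 ≤ location ∧ location ≤ (n:Int)
  · -- in range
    obtain ⟨h1, h2⟩ := hin
    set k : Nat := (location - 1).toNat with hkdef
    have hlock : location - 1 = (k:Int) := by omega
    have hkn : k < n := by omega
    have hidx : (n:Int) - location = ((n - (k+1) : Nat) : Int) := by omega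
    -- B side
    rw [if_pos (by constructor <;> omega)]
    rw [PySem.List.slice_to cs (by omega : (0:Int) ≤ (n:Int) - location)]
    rw [PySem.List.slice_from cs (by omega : (0:Int) ≤ (n:Int) - location + 1)]
    -- A side: body to flatMap
    have hb : (fun (acc : List Char) i =>
        if i = location - 1 then acc ++ pvFlipDigit (PySem.List.pyGetD cs.reverse i ' ')
        else acc ++ [PySem.List.pyGetD cs.reverse i ' ']) =
        (fun (acc : List Char) i => acc ++
          (if i = location - 1 then pvFlipDigit (PySem.List.pyGetD cs.reverse i ' ')
           else [PySem.List.pyGetD cs.reverse i ' '])) := by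
      funext acc i; split <;> rfl
    rw [hb, PySem.List.foldl_append_eq_flatMap]
    have hlen : (cs.reverse.length : Int) = (n:Int) := by rw [List.length_reverse, ← hn]
    rw [hlen]
    rw [PySem.List.pyRange_one_append 0 (k:Int) (n:Int) (by omega) (by omega)]
    rw [PySem.List.pyRange_one_cons (by omega : (k:Int) < (n:Int))]
    rw [List.flatMap_append, List.flatMap_cons]
    have hg1 : (PySem.List.pyRange 0 (k:Int) 1).flatMap
        (fun i => if i = location - 1 then pvFlipDigit (PySem.List.pyGetD cs.reverse i ' ')
           else [PySem.List.pyGetD cs.reverse i ' ']) =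
        (PySem.List.pyRange 0 (k:Int) 1).map (fun i => PySem.List.pyGetD cs.reverse i ' ') := by
      apply pv_flatMap_eq_map_of
      intro x hx
      rw [PySem.List.mem_pyRange_one] at hx
      rw [if_neg (by omega)]
    have hg3 : (PySem.List.pyRange ((k:Int)+1) (n:Int) 1).flatMap
        (fun i => if i = location - 1 then pvFlipDigit (PySem.List.pyGetD cs.reverse i ' ')
           else [PySem.List.pyGetD cs.reverse i ' ']) =
        (PySem.List.pyRange ((k:Int)+1) (n:Int) 1).map (fun i => PySem.List.pyGetD cs.reverse i ' ') := by
      apply pv_flatMap_eq_map_of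
      intro x hx
      rw [PySem.List.mem_pyRange_one] at hx
      rw [if_neg (by omega)]
    rw [hg1, hg3, if_pos hlock.symm]
    rw [pv_map_pyGetD_take cs.reverse k (by simp; omega)]
    have h3 : (PySem.List.pyRange ((k:Int)+1) (n:Int) 1).map
        (fun i => PySem.List.pyGetD cs.reverse i ' ') = cs.reverse.drop (k+1) := by
      have h := PySem.List.map_pyGetD_pyRange' cs.reverse ' ' (by omega : (0:Int) ≤ (k:Int)+1)
      simp only [List.length_reverse] at h
      rw [← hn] at h
      rw [h]
      congr 1
    rw [h3]
    -- middle char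
    have hmid : PySem.List.pyGetD cs.reverse ((k:Int)) ' ' = cs[n - (k+1)]'(by omega) := by
      rw [PySem.List.pyGetD_natCast]
      rw [List.getD_eq_getElem cs.reverse ' ' (by simp; omega)]
      rw [List.getElem_reverse]
      congr 1
      omega
    have hmidB : PySem.List.pyGetD cs ((n:Int) - location) ' ' = cs[n - (k+1)]'(by omega) := by
      rw [hidx, PySem.List.pyGetD_natCast]
      exact List.getD_eq_getElem cs ' ' (by omega)
    rw [hmid, hmidB]
    -- digit fact from Pre_
    have hdig : (cs[n - (k+1)]'(by omega)).isDigit = true := by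
      have := hpre h1 h2
      rw [← hcs] at this
      have hln : location.toNat = k + 1 := by omega
      rw [hln] at this
      rwa [List.getD_eq_getElem cs '0' (by omega)] at this
    -- assemble
    simp only [List.reverse_append, List.nil_append,
      List.append_assoc]
    rw [pv_flip_rev _ hdig]
    rw [List.drop_reverse, List.take_reverse]
    simp only [List.reverse_reverse]
    have e1 : ((n:Int) - location).toNat = cs.length - (k+1) := by omega
    have e2 : ((n:Int) - location + 1).toNat = cs.length - k := by omega
    rw [e1, e2]
  · -- out of range
    rw [if_neg (by omega)]
    have hlen : (cs.reverse.length : Int) = (n:Int) := by rw [List.length_reverse, ← hn]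
    rw [hlen]
    rw [PySem.List.foldl_congr_mem _ _
      (fun (acc : List Char) i => acc ++ [PySem.List.pyGetD cs.reverse i ' ']) _
      (by
        intro acc x hx
        rw [PySem.List.mem_pyRange_one] at hx
        rw [if_neg (by omega)])]
    have := PySem.List.foldl_pyRange_zero_pyGetD' cs.reverse ' '
      (fun (acc : List Char) c => acc ++ [c]) []
    simp only [List.length_reverse, ← hn] at this
    rw [this, PySem.List.foldl_append_singleton_eq_self]
    simp

-- ===== VERDICT (by name: the statement is the Claim_ definition above) =====
theorem fix_error_spec : Claim_equal_fix_error := by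
  intro arr location _ hpre
  exact fix_error_eq arr location hpre
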